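-- pv_equiv track=rewrite | github.com/lhj940825/algorithm | programmers/complete_search_q1.py | solution
-- ===== SOURCE A (Python) =====
-- def solution(answers):
--     students = [1,2,3]
--     stu1_sol = [1,2,3,4,5]
--     stu2_sol = [2,1,2,3,2,4,2,5]
--     stu3_sol = [3,3,1,1,2,2,4,4,5,5]
--
--     stu1_ans_cnt = 0
--     stu2_ans_cnt = 0
--     stu3_ans_cnt = 0
--
--     len_stu1_pattern = 5
--     len_stu2_pattern = 8
--     len_stu3_pattern = 10
--
--     num_answers = len(answers)
--     i = 0
--
--     while i< num_answers:
--         cur_ans = answers[i]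
--         if stu1_sol[i%len_stu1_pattern] == cur_ans: stu1_ans_cnt += 1
--         if stu2_sol[i%len_stu2_pattern] == cur_ans: stu2_ans_cnt += 1
--         if stu3_sol[i%len_stu3_pattern] == cur_ans: stu3_ans_cnt += 1
--         i += 1
--
--     list_stu_ans_cnt = [stu1_ans_cnt, stu2_ans_cnt, stu3_ans_cnt]
--     max_ans_cnt = max(list_stu_ans_cnt)
--
--     answer = [i + 1 for i, cnt in enumerate(list_stu_ans_cnt) if cnt == max_ans_cnt]
--     return answer
-- ===== SOURCE B (Python) =====
-- from collections import Counter
--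
-- def solution(answers):
--     patterns = [[1, 2, 3, 4, 5],
--                 [2, 1, 2, 3, 2, 4, 2, 5],
--                 [3, 3, 1, 1, 2, 2, 4, 4, 5, 5]]
--     # All three patterns repeat with period dividing 40: index a Counter by
--     # (position mod 40, answer) once, then each student's score is 40 lookups.
--     freq = Counter((i % 40, a) for i, a in enumerate(answers))
--     counts = [sum(freq[(r, pat[r % len(pat)])] for r in range(40)) for pat in patterns]
--     best = max(counts)
--     return [i + 1 for i, c in enumerate(counts) if c == best]
-- ===== Notes on version B (the rewrite author's own statement) =====
-- stated objective: alternative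
-- what changed: B builds a Counter keyed by (index mod 40, answer) in one pass and computes each student's score as 40 table lookups (the patterns' common period divides 40), instead of A's interleaved per-index comparison loop.
import Mathlib
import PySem

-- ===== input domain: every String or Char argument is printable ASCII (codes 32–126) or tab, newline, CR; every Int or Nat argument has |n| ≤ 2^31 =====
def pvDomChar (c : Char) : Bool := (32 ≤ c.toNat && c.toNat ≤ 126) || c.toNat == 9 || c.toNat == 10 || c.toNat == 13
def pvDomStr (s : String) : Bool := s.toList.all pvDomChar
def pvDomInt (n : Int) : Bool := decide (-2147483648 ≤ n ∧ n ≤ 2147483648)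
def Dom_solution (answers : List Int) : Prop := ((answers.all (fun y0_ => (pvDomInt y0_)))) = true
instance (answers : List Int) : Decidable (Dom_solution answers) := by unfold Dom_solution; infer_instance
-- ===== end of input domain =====

-- One honest line: B replaces A's interleaved index-mod comparison loop with a Counter
-- keyed by (index mod 40, answer) built in one pass, each score then being 40 lookups
-- (all three patterns repeat with period dividing 40); same O(n) cost, different structure.

-- ===== PORT A =====
-- the while loop over i < len(answers): transliterated as structural recursion on the
-- remaining answers, carrying the index i and the three counters (the same state)
def solLoopA : List Int → Nat → Int → Int → Int → Int × Int × Int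
  | [], _, c1, c2, c3 => (c1, c2, c3)
  | a :: rest, i, c1, c2, c3 =>
      solLoopA rest (i + 1)
        (if ([1,2,3,4,5] : List Int).getD (i % 5) 0 == a then c1 + 1 else c1)
        (if ([2,1,2,3,2,4,2,5] : List Int).getD (i % 8) 0 == a then c2 + 1 else c2)
        (if ([3,3,1,1,2,2,4,4,5,5] : List Int).getD (i % 10) 0 == a then c3 + 1 else c3)

def solution (answers : List Int) : List Int :=
  let (c1, c2, c3) := solLoopA answers 0 0 0 0
  let lst : List Int := [c1, c2, c3]
  let mx := (PySem.List.max? lst (fun x => x)).getD 0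
  (PySem.List.enumerate lst).foldr
    (fun p acc => if p.2 == mx then (p.1 + 1) :: acc else acc) []

-- ===== PORT B =====
-- Counter((i % 40, a) for i, a in enumerate(answers))
def bKeyed (answers : List Int) : List (Int × Int) :=
  (PySem.List.enumerate answers).map (fun p => (PySem.Int.mod p.1 40, p.2))

-- sum(freq[(r, pat[r % len(pat)])] for r in range(40))
def bScore (freq : PySem.Dict (Int × Int) Int) (pat : List Int) : Int :=
  ((PySem.List.pyRange 0 40 1).map
    (fun r => freq.getD (r, PySem.List.pyGetD pat (PySem.Int.mod r (pat.length : Int)) 0) 0)).sum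

def solution_alt (answers : List Int) : List Int :=
  let freq := PySem.Dict.counter (bKeyed answers)
  let counts := ([[1,2,3,4,5], [2,1,2,3,2,4,2,5], [3,3,1,1,2,2,4,4,5,5]] : List (List Int)).map
      (bScore freq)
  let best := (PySem.List.max? counts (fun x => x)).getD 0
  (PySem.List.enumerate counts).foldr
    (fun p acc => if p.2 == best then (p.1 + 1) :: acc else acc) []

-- ===== PRECONDITION & SPEC =====
def Spec_solution (answers : List Int) (out : List Int) : Prop := out = solution_alt answers
instance (answers : List Int) (out : List Int) : Decidable (Spec_solution answers out) := by unfold Spec_solution; infer_instance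

-- ===== CLAIM (what is proved, stated in full; the proofs are below) =====
def Claim_equal_solution : Prop := ∀ (answers : List Int), Dom_solution answers → Spec_solution answers (solution answers)

-- ===== LEMMAS AND PROOFS =====

-- reference count: matches of answers (from position i) against pattern pat of period m
def cntFrom (pat : List Int) (m : Nat) : List Int → Nat → Int
  | [], _ => 0
  | a :: rest, i => (if pat.getD (i % m) 0 == a then 1 else 0) + cntFrom pat m rest (i + 1)

-- A's interleaved loop is the triple of the three reference counts
theorem loopA_eq (answers : List Int) : ∀ (i : Nat) (c1 c2 c3 : Int),
    solLoopA answers i c1 c2 c3 =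
      (c1 + cntFrom [1,2,3,4,5] 5 answers i,
       c2 + cntFrom [2,1,2,3,2,4,2,5] 8 answers i,
       c3 + cntFrom [3,3,1,1,2,2,4,4,5,5] 10 answers i) := by
  induction answers with
  | nil => intro i c1 c2 c3; simp [solLoopA, cntFrom]
  | cons a rest ih =>
    intro i c1 c2 c3
    rw [solLoopA, ih, cntFrom, cntFrom, cntFrom]
    refine Prod.ext ?_ (Prod.ext ?_ ?_) <;> dsimp only <;> split_ifs <;> ring

-- indicator sum over a duplicate-free list containing k
theorem indSum_not_mem (v : Int → Int) (k a : Int) :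
    ∀ rs : List Int, k ∉ rs →
      (rs.map (fun r => if ((k, a) : Int × Int) == (r, v r) then (1 : Int) else 0)).sum = 0 := by
  intro rs
  induction rs with
  | nil => intro _; simp
  | cons r rs' ih =>
    intro hk
    have hkr : k ≠ r := fun h => hk (h ▸ List.mem_cons_self)
    have hk' : k ∉ rs' := fun h => hk (List.mem_cons_of_mem _ h)
    rw [List.map_cons, List.sum_cons, ih hk']
    simp [hkr]

theorem indSum_mem (v : Int → Int) (k a : Int) :
    ∀ rs : List Int, rs.Nodup → k ∈ rs →
      (rs.map (fun r => if ((k, a) : Int × Int) == (r, v r) then (1 : Int) else 0)).sum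
        = if a == v k then 1 else 0 := by
  intro rs
  induction rs with
  | nil => intro _ h; simp at h
  | cons r rs' ih =>
    intro hnd hk
    have hnd' := hnd.of_cons
    have hr : r ∉ rs' := (List.nodup_cons.mp hnd).1
    rcases List.mem_cons.mp hk with rfl | hk'
    · simp only [List.map_cons, List.sum_cons, indSum_not_mem v k a rs' hr]
      simp
    · have hkr : k ≠ r := fun h => hr (h ▸ hk')
      rw [List.map_cons, List.sum_cons, ih hnd' hk']
      simp [hkr]

-- summing per-key counts over all keys counts the matching pairs once each
theorem sumCount (v : Int → Int) (rs : List Int) (hnd : rs.Nodup) :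
    ∀ l : List (Int × Int), (∀ p ∈ l, p.1 ∈ rs) →
      (rs.map (fun r => (l.count (r, v r) : Int))).sum
        = (l.countP (fun p => p.2 == v p.1) : Int) := by
  intro l
  induction l with
  | nil => intro _; simp
  | cons x t ih =>
    intro hmem
    obtain ⟨k, a⟩ := x
    have hks : k ∈ rs := hmem (k, a) List.mem_cons_self
    have ht : ∀ p ∈ t, p.1 ∈ rs := fun p hp => hmem p (List.mem_cons_of_mem _ hp)
    have hsplit : (rs.map (fun r => (((k, a) :: t).count (r, v r) : Int))).sum
        = (rs.map (fun r => (t.count (r, v r) : Int))).sum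
          + (rs.map (fun r => if ((k, a) : Int × Int) == (r, v r) then (1 : Int) else 0)).sum := by
      rw [← List.sum_map_add]
      refine congrArg List.sum (List.map_congr_left ?_)
      intro r _
      rw [List.count_cons]
      push_cast
      ring
    rw [hsplit, ih ht, indSum_mem v k a rs hnd hks, List.countP_cons]
    push_cast
    split_ifs <;> simp

-- the reference count equals B's countP over the (i mod 40, a) keyed list
theorem cntFrom_eq_countP (pat : List Int) (m : Nat) (hm : m ∣ 40)
    (hlen : pat.length = m) (answers : List Int) : ∀ i : Nat,
    cntFrom pat m answers i
      = (((PySem.List.enumerate answers (i : Int)).map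
            (fun p => (PySem.Int.mod p.1 40, p.2))).countP
          (fun p => p.2 == PySem.List.pyGetD pat (PySem.Int.mod p.1 (pat.length : Int)) 0) : Int) := by
  induction answers with
  | nil => intro i; simp [cntFrom, PySem.List.enumerate]
  | cons a rest ih =>
    intro i
    rw [cntFrom, PySem.List.enumerate_cons, List.map_cons, List.countP_cons]
    have hidx : PySem.List.pyGetD pat (PySem.Int.mod (PySem.Int.mod (i : Int) 40) (pat.length : Int)) 0
        = pat.getD (i % m) 0 := by
      have h1 : PySem.Int.mod (i : Int) 40 = ((i % 40 : Nat) : Int) := by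
        exact_mod_cast PySem.Int.mod_natCast i 40
      have h2 : PySem.Int.mod ((i % 40 : Nat) : Int) (pat.length : Int)
          = ((i % 40 % pat.length : Nat) : Int) := by
        exact_mod_cast PySem.Int.mod_natCast (i % 40) pat.length
      have hdvd : pat.length ∣ 40 := by rw [hlen]; exact hm
      rw [h1, h2, Nat.mod_mod_of_dvd i hdvd, PySem.List.pyGetD_natCast, hlen]
    have hcast : ((i : Int) + 1) = (((i + 1 : Nat)) : Int) := by push_cast; ring
    rw [hcast, ih (i + 1)]
    simp only [hidx]
    have hbeq : (a == pat.getD (i % m) 0) = (pat.getD (i % m) 0 == a) := by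
      simp [eq_comm]
    rw [hbeq]
    push_cast
    split_ifs <;> ring

-- B's score of a pattern is the reference count from position 0
theorem bScore_eq (pat : List Int) (m : Nat) (hm : m ∣ 40)
    (hlen : pat.length = m) (answers : List Int) :
    bScore (PySem.Dict.counter (bKeyed answers)) pat = cntFrom pat m answers 0 := by
  unfold bScore
  have hget : ∀ r : Int,
      (PySem.Dict.counter (bKeyed answers)).getD
          (r, PySem.List.pyGetD pat (PySem.Int.mod r (pat.length : Int)) 0) 0
        = ((bKeyed answers).count
            (r, PySem.List.pyGetD pat (PySem.Int.mod r (pat.length : Int)) 0) : Int) := by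
    intro r; exact PySem.Dict.getD_counter _ _
  rw [List.map_congr_left (fun r _ => hget r)]
  have hmem : ∀ p ∈ bKeyed answers, p.1 ∈ PySem.List.pyRange 0 40 1 := by
    intro p hp
    unfold bKeyed at hp
    obtain ⟨q, hq, rfl⟩ := List.mem_map.mp hp
    rw [PySem.List.mem_pyRange_one]
    exact ⟨PySem.Int.mod_nonneg q.1 (b := 40) (by norm_num), PySem.Int.mod_lt q.1 (b := 40) (by norm_num)⟩
  rw [sumCount (fun r => PySem.List.pyGetD pat (PySem.Int.mod r (pat.length : Int)) 0)
        (PySem.List.pyRange 0 40 1) (PySem.List.nodup_pyRange_one 0 40) (bKeyed answers) hmem,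
      cntFrom_eq_countP pat m hm hlen answers 0]
  rfl

-- ===== VERDICT (by name: the statement is the Claim_ definition above) =====
theorem solution_spec : Claim_equal_solution := by
  intro answers _
  unfold Spec_solution solution solution_alt
  rw [loopA_eq answers 0 0 0 0]
  simp only [List.map_cons, List.map_nil,
      bScore_eq [1,2,3,4,5] 5 (by decide) rfl,
      bScore_eq [2,1,2,3,2,4,2,5] 8 (by decide) rfl,
      bScore_eq [3,3,1,1,2,2,4,4,5,5] 10 (by decide) rfl,
      zero_add]
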